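-- pv_equiv track=rewrite | github.com/ARise-fox/iPhylo-CLI | scripts/chemonline.py | merge_lists
-- ===== SOURCE A (Python) =====
-- def merge_lists(lists):
--     """
--     接受一个列表的列表 lists，将具有相同前缀的列表合并成一个新的列表，新列表中的最后一个元素是原来每个列表的最后一个元素的字符串形式以 "_" 连接的结果。
--     :param lists:二维列表
--     :return: lists
--     """
--     result = {}
--     for lst in lists:
--         key = tuple(lst[:-1])
--         value = str(lst[-1])
--         if key in result:
--             result[key].append(value)
--         else:
--             result[key] = [value]
--
--     return [[*k, '_'.join(v)] for k, v in result.items()]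
-- ===== SOURCE B (Python) =====
-- def merge_lists(lists):
--     # Same result as A, computed without a dict: collect distinct prefixes in
--     # first-appearance order, then one fresh scan of the input per prefix.
--     keys = []
--     for lst in lists:
--         key = tuple(lst[:-1])
--         if key not in keys:
--             keys.append(key)
--     return [[*key,
--              '_'.join(str(lst[-1]) for lst in lists if tuple(lst[:-1]) == key)]
--             for key in keys]
-- ===== Notes on version B (the rewrite author's own statement) =====
-- stated objective: alternative
-- what changed: Replaces the single-pass dict grouping with a dict-free two-phase algorithm: first collect the distinct prefixes in first-appearance order, then for each prefix rescan the whole input to join its last elements.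
import Mathlib
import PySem

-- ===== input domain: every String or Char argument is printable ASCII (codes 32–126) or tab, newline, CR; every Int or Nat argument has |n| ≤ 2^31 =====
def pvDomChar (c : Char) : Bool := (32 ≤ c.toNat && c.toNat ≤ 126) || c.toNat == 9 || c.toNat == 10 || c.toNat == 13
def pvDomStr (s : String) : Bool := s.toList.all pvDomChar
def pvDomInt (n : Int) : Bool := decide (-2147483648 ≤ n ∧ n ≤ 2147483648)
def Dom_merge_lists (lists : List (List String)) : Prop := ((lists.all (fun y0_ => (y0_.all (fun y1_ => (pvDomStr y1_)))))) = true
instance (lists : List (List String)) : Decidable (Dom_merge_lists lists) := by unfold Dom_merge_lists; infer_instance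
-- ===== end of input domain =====

-- B replaces A's dict grouping by a dict-free two-phase algorithm (distinct prefixes
-- first, then one rescan per prefix); return values proved equal on all inputs where
-- the Python code returns (every inner list nonempty).

-- ===== PORT A =====
-- str(lst[-1]): the elements are already strings, so str() is identity; lst[-1] raises
-- on empty lst (pyGet? = none, excluded by Pre_; .getD "" only fills the excluded case).
def pvLastVal (lst : List String) : String := (PySem.List.pyGet? lst (-1)).getD ""

def merge_lists (lists : List (List String)) : List (List String) :=
  let result := lists.foldl (fun d lst =>
    let key := lst.dropLast                -- tuple(lst[:-1]) = dropLast, exact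
    let value := pvLastVal lst
    if d.contains key then d.modify key [] (fun v => v ++ [value])  -- result[key].append(value)
    else d.insert key [value]) PySem.Dict.empty
  result.items.map (fun kv => kv.1 ++ [PySem.Str.join "_" kv.2])

-- ===== PORT B =====
def merge_lists_alt (lists : List (List String)) : List (List String) :=
  let keys := lists.foldl (fun ks lst =>
    if lst.dropLast ∈ ks then ks else ks ++ [lst.dropLast]) []
  keys.map (fun key =>
    key ++ [PySem.Str.join "_"
      ((lists.filter (fun lst => lst.dropLast == key)).map pvLastVal)])

-- ===== PRECONDITION & SPEC =====
-- Pre_ excludes inputs containing an empty inner list: there lst[-1] raises IndexError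
-- in both A and B.
def Pre_merge_lists (lists : List (List String)) : Prop := ∀ lst ∈ lists, lst ≠ []
instance (lists : List (List String)) : Decidable (Pre_merge_lists lists) := by unfold Pre_merge_lists; infer_instance
def pvWitness_merge_lists : List (List String) := [["a", "1"], ["a", "2"], ["b", "3"]]

def Spec_merge_lists (lists : List (List String)) (out : List (List String)) : Prop := out = merge_lists_alt lists
instance (lists : List (List String)) (out : List (List String)) : Decidable (Spec_merge_lists lists out) := by unfold Spec_merge_lists; infer_instance

-- ===== CLAIM (what is proved, stated in full; the proofs are below) =====
def Claim_equal_merge_lists : Prop := ∀ (lists : List (List String)), Dom_merge_lists lists → Pre_merge_lists lists → Spec_merge_lists lists (merge_lists lists)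

-- ===== LEMMAS AND PROOFS =====

-- A's branchy step is exactly Dict.modify with default [].
theorem pv_stepA_eq_modify (d : PySem.Dict (List String) (List String)) (k : List String) (v : String) :
    (if d.contains k then d.modify k [] (fun w => w ++ [v]) else d.insert k [v])
      = d.modify k [] (fun w => w ++ [v]) := by
  by_cases h : d.contains k = true
  · simp [h]
  · simp only [Bool.not_eq_true] at h
    simp [h, PySem.Dict.modify, PySem.Dict.getD_of_not_contains _ _ h]

theorem pv_merge_lists_eq (lists : List (List String)) :
    merge_lists lists = merge_lists_alt lists := by
  unfold merge_lists merge_lists_alt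
  have hpairs :
      (lists.foldl (fun d lst =>
          if d.contains lst.dropLast then d.modify lst.dropLast [] (fun v => v ++ [pvLastVal lst])
          else d.insert lst.dropLast [pvLastVal lst]) PySem.Dict.empty)
        = (lists.map (fun lst => (lst.dropLast, pvLastVal lst))).foldl
            (fun d p => d.modify p.1 [] (fun v => v ++ [p.2])) PySem.Dict.empty := by
    rw [List.foldl_map]
    exact PySem.List.foldl_congr_mem lists _ _ PySem.Dict.empty
      (fun d lst _ => pv_stepA_eq_modify d lst.dropLast (pvLastVal lst))
  simp only [hpairs]
  set pairs := lists.map (fun lst => (lst.dropLast, pvLastVal lst)) with hp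
  set D := pairs.foldl (fun d p => d.modify p.1 [] (fun v => v ++ [p.2])) PySem.Dict.empty with hD
  have hnodup : D.keys.Nodup := by
    rw [hD]
    exact PySem.Dict.nodup_keys_foldl_modify_key pairs Prod.fst [] (fun _ p => fun v => v ++ [p.2])
      PySem.Dict.empty (by simp [PySem.Dict.keys_empty])
  have hkeys : D.keys = PySem.Set.ofList (lists.map List.dropLast) := by
    rw [hD]
    have := PySem.Dict.keys_foldl_modify_key pairs Prod.fst [] (fun _ p => fun v => v ++ [p.2])
      (PySem.Dict.empty (κ := List String) (ν := List String))
    simp only [PySem.Dict.keys_empty] at this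
    rw [this, PySem.Set.update_nil_left, hp, List.map_map]
    rfl
  have hgetD : ∀ k, D.getD k [] =
      ((lists.filter (fun lst => lst.dropLast == k)).map pvLastVal) := by
    intro k
    rw [hD]
    rw [PySem.Dict.getD_foldl_modify_append pairs PySem.Dict.empty k,
      PySem.Dict.getD_empty, List.nil_append, hp, List.filter_map, List.map_map]
    rfl
  have hitems : D.items = D.keys.map (fun k => (k, D.getD k [])) :=
    PySem.Dict.items_eq_map_keys D hnodup []
  have hks : lists.foldl (fun ks lst =>
      if lst.dropLast ∈ ks then ks else ks ++ [lst.dropLast]) []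
        = PySem.Set.ofList (lists.map List.dropLast) := by
    rw [← PySem.Set.update_nil_left, PySem.Set.update_map_eq_foldl_add]
    apply PySem.List.foldl_congr_mem
    intro s lst _
    rw [PySem.Set.add_eq_ite]
  rw [hitems, hkeys, hks, List.map_map]
  apply List.map_congr_left
  intro k hk
  simp only [Function.comp]
  rw [hgetD k]

-- ===== VERDICT (by name: the statement is the Claim_ definition above) =====
theorem merge_lists_spec : Claim_equal_merge_lists := by
  intro lists _ _
  unfold Spec_merge_lists
  exact pv_merge_lists_eq lists
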